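-- pv_equiv track=rewrite | github.com/AmlanMishra2004/OSLab | bank2.py | find_all_safe_sequences
-- ===== SOURCE A (Python) =====
-- from typing import List, Tuple
--
-- def compute_need(maxm: List[List[int]], alloc: List[List[int]]) -> List[List[int]]:
--     n = len(maxm)
--     m = len(maxm[0]) if n>0 else 0
--     need = [[maxm[i][j] - alloc[i][j] for j in range(m)] for i in range(n)]
--     return need
--
-- def is_less_or_equal(a: List[int], b: List[int]) -> bool:
--     return all(x <= y for x, y in zip(a, b))
--
-- def add_vec(a: List[int], b: List[int]) -> List[int]:
--     return [x + y for x, y in zip(a, b)]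
--
-- def find_all_safe_sequences(maxm: List[List[int]], alloc: List[List[int]], available: List[int]) -> List[List[int]]:
--     """
--     Return list of all safe sequences (each sequence is a list of process indices).
--     Uses recursion/backtracking.
--     """
--     n = len(maxm)
--     need = compute_need(maxm, alloc)
--     work = available.copy()
--     finish = [False]*n
--     all_seq = []
--     seq = []
--
--     def backtrack(work, finish, seq):
--         if len(seq) == n:
--             all_seq.append(seq.copy())
--             return
--         progressed = False
--         for i in range(n):
--             if not finish[i] and is_less_or_equal(need[i], work):
--                 progressed = True
--                 # choose i
--                 finish[i] = True
--                 new_work = add_vec(work, alloc[i])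
--                 seq.append(i)
--                 backtrack(new_work, finish, seq)
--                 # undo
--                 seq.pop()
--                 finish[i] = False
--         # if no available choice, this path dies (no action)
--
--     backtrack(work, finish, seq)
--     return all_seq
-- ===== SOURCE B (Python) =====
-- def find_all_safe_sequences(maxm, alloc, available):
--     """Iterative DFS with an explicit stack of (work, finish, seq) states."""
--     n = len(maxm)
--     m = len(maxm[0]) if n > 0 else 0
--     need = [[maxm[i][j] - alloc[i][j] for j in range(m)] for i in range(n)]
--     all_seq = []
--     stack = [(available[:], [False] * n, [])]
--     while stack:
--         work, finish, seq = stack.pop()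
--         if len(seq) == n:
--             all_seq.append(seq)
--             continue
--         # push eligible processes in reverse index order so the smallest
--         # index is expanded first (matching lexicographic DFS order)
--         for i in reversed(range(n)):
--             if not finish[i] and all(x <= y for x, y in zip(need[i], work)):
--                 stack.append(([w + a for w, a in zip(work, alloc[i])],
--                               finish[:i] + [True] + finish[i + 1:],
--                               seq + [i]))
--     return all_seq
-- ===== Notes on version B (the rewrite author's own statement) =====
-- stated objective: alternative
-- what changed: The recursive backtracking with a mutable finish/seq and undo steps is replaced by an iterative DFS over an explicit stack of immutable (work, finish, seq) states, pushing eligible children in reverse index order to preserve A's lexicographic output order.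
import Mathlib
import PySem

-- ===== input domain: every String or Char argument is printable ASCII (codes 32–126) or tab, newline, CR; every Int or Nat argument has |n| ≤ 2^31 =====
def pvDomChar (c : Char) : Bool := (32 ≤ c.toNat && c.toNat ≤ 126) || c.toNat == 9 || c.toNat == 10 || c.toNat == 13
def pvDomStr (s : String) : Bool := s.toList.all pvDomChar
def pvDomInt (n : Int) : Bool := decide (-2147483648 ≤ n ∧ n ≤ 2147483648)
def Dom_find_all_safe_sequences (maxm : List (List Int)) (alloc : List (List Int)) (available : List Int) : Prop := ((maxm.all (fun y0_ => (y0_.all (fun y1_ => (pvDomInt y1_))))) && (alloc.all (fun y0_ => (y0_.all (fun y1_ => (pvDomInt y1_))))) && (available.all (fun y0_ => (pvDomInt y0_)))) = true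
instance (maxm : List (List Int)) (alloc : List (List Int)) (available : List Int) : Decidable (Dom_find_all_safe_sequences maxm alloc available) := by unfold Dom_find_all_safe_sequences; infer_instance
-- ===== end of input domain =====

-- B replaces A's recursive backtracking (mutable finish/seq with undo) by an iterative DFS over
-- an explicit stack of immutable states, pushing children in reverse index order; same cost.

-- ===== PORT A =====
-- is_less_or_equal: zip truncates exactly like Python's zip
def pvLeq (a b : List Int) : Bool := (a.zip b).all (fun p => p.1 ≤ p.2)
-- add_vec
def pvAdd (a b : List Int) : List Int := List.zipWith (· + ·) a b
-- compute_need; getD is exact here because Pre_ guarantees all indices are in range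
def pvNeed (maxm alloc : List (List Int)) : List (List Int) :=
  let n := maxm.length
  let m := (maxm.headD []).length       -- len(maxm[0]) if n>0 else 0
  (List.range n).map (fun i => (List.range m).map (fun j =>
    ((maxm.getD i []).getD j 0) - ((alloc.getD i []).getD j 0)))

-- eligibility test 'not finish[i] and is_less_or_equal(need[i], work)' (in range under Pre_)
def pvElig (need : List (List Int)) (work : List Int) (finish : List Bool) (i : Nat) : Bool :=
  !(finish.getD i false) && pvLeq (need.getD i []) work

-- A's backtrack: fuel is only a totality guard; the initial call passes fuel = n and each
-- recursive call extends seq by one, so fuel never runs out on a reachable state.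
def pvBacktrack (n : Nat) (need alloc : List (List Int)) :
    Nat → List Int → List Bool → List Int → List (List Int) → List (List Int)
  | fuel, work, finish, seq, acc =>
    if seq.length = n then acc ++ [seq]
    else
      match fuel with
      | 0 => acc
      | fuel' + 1 =>
        (List.range n).foldl
          (fun a i =>
            if pvElig need work finish i then
              pvBacktrack n need alloc fuel' (pvAdd work (alloc.getD i []))
                (finish.set i true) (seq ++ [(i : Int)]) a
            else a)
          acc

def find_all_safe_sequences (maxm : List (List Int)) (alloc : List (List Int)) (available : List Int) : List (List Int) :=
  let n := maxm.length
  let need := pvNeed maxm alloc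
  pvBacktrack n need alloc n available (List.replicate n false) [] []

-- ===== PORT B =====
-- one child state: (new_work, finish with i set, seq + [i])
def pvChild (alloc : List (List Int)) (work : List Int) (finish : List Bool) (seq : List Int) (i : Nat) :
    List Int × List Bool × List Int :=
  (pvAdd work (alloc.getD i []), finish.set i true, seq ++ [(i : Int)])

-- the 'for i in reversed(range(n)): if eligible: stack.append(child)' loop of Source B, with the
-- stack top at the list head (so append = cons); cited by name in decreasing_by below
def pvPush (n : Nat) (need alloc : List (List Int)) (work : List Int) (finish : List Bool) (seq : List Int)
    (st : List (List Int × List Bool × List Int)) : List (List Int × List Bool × List Int) :=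
  (List.range n).reverse.foldl
    (fun st i => if pvElig need work finish i then pvChild alloc work finish seq i :: st else st) st

lemma pvPush_eq (n : Nat) (need alloc : List (List Int)) (work : List Int) (finish : List Bool) (seq : List Int)
    (st : List (List Int × List Bool × List Int)) :
    pvPush n need alloc work finish seq st =
      (((List.range n).filter (pvElig need work finish)).map (pvChild alloc work finish seq)) ++ st := by
  unfold pvPush
  rw [List.foldl_reverse]
  induction List.range n with
  | nil => rfl
  | cons a l ih => simp only [List.foldr_cons, ih, List.filter_cons]; split <;> simp

-- state weight for termination of the stack loop
def pvWt (n : Nat) (st : List Int × List Bool × List Int) : Nat := (n + 1) ^ (n + 1 - st.2.2.length)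

lemma pvPush_wt_lt (n : Nat) (need alloc : List (List Int)) (work : List Int) (finish : List Bool)
    (seq : List Int) (rest : List (List Int × List Bool × List Int)) (h : seq.length < n) :
    ((pvPush n need alloc work finish seq rest).map (pvWt n)).sum <
      (n + 1) ^ (n + 1 - seq.length) + (rest.map (pvWt n)).sum := by
  rw [pvPush_eq]
  have hlen : (((List.range n).filter (pvElig need work finish)).map (pvChild alloc work finish seq)).length ≤ n := by
    simpa using le_trans (List.length_filter_le _ _) (le_of_eq (List.length_range))
  have hsum : ((((List.range n).filter (pvElig need work finish)).map (pvChild alloc work finish seq)).map (pvWt n)).sum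
      = (((List.range n).filter (pvElig need work finish)).map (pvChild alloc work finish seq)).length * (n + 1) ^ (n - seq.length) := by
    generalize ((List.range n).filter (pvElig need work finish)) = l
    induction l with
    | nil => simp
    | cons a l ih =>
      simp only [List.map_cons, List.sum_cons, List.length_cons, ih]
      have : pvWt n (pvChild alloc work finish seq a) = (n + 1) ^ (n - seq.length) := by
        simp only [pvWt, pvChild]
        congr 1
        simp only [List.length_append, List.length_cons, List.length_nil]
        omega
      rw [this]; ring
  rw [List.map_append, List.sum_append, hsum]
  have h1 : (((List.range n).filter (pvElig need work finish)).map (pvChild alloc work finish seq)).length * (n + 1) ^ (n - seq.length)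
      ≤ n * (n + 1) ^ (n - seq.length) := Nat.mul_le_mul_right _ hlen
  have h2 : n * (n + 1) ^ (n - seq.length) < (n + 1) ^ (n + 1 - seq.length) := by
    have he : n + 1 - seq.length = (n - seq.length) + 1 := by omega
    rw [he, pow_succ]
    have hp : 0 < (n + 1) ^ (n - seq.length) := Nat.pow_pos (by omega)
    calc n * (n + 1) ^ (n - seq.length) < (n + 1) * (n + 1) ^ (n - seq.length) :=
          (Nat.mul_lt_mul_right hp).mpr (by omega)
      _ = (n + 1) ^ (n - seq.length) * (n + 1) := by ring
  omega

-- Source B's while-stack loop.  Python's test is 'len(seq) == n'; '≤' is used so that the weight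
-- measure decreases on all inputs — on every reachable state seq.length ≤ n, so they agree.
def pvLoop (n : Nat) (need alloc : List (List Int)) :
    List (List Int × List Bool × List Int) → List (List Int) → List (List Int)
  | [], acc => acc
  | (work, finish, seq) :: rest, acc =>
    if _h : n ≤ seq.length then
      pvLoop n need alloc rest (acc ++ [seq])
    else
      pvLoop n need alloc (pvPush n need alloc work finish seq rest) acc
termination_by st _ => (st.map (pvWt n)).sum
decreasing_by
  · have : 0 < pvWt n (work, finish, seq) := Nat.pow_pos (by omega)
    simp only [List.map_cons, List.sum_cons]; omega
  · have := pvPush_wt_lt n need alloc work finish seq rest (by omega)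
    simp only [List.map_cons, List.sum_cons]
    simpa [pvWt] using this

def find_all_safe_sequences_alt (maxm : List (List Int)) (alloc : List (List Int)) (available : List Int) : List (List Int) :=
  let n := maxm.length
  let need := pvNeed maxm alloc
  pvLoop n need alloc [(available, List.replicate n false, [])] []

-- ===== PRECONDITION & SPEC =====
-- Pre_ admits exactly the inputs where Python A returns: it excludes only the ragged shapes on
-- which A raises IndexError (alloc with fewer rows than maxm, or a maxm/alloc row shorter than
-- maxm's first row).
def Pre_find_all_safe_sequences (maxm : List (List Int)) (alloc : List (List Int)) (available : List Int) : Prop :=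
  maxm.length ≤ alloc.length ∧
  (∀ r ∈ maxm, (maxm.headD []).length ≤ r.length) ∧
  (∀ r ∈ alloc.take maxm.length, (maxm.headD []).length ≤ r.length)
instance (maxm : List (List Int)) (alloc : List (List Int)) (available : List Int) : Decidable (Pre_find_all_safe_sequences maxm alloc available) := by unfold Pre_find_all_safe_sequences; infer_instance

def pvWitness_find_all_safe_sequences : List (List Int) × List (List Int) × List Int :=
  ([[1, 0], [0, 1]], [[0, 0], [0, 0]], [1, 1])

def Spec_find_all_safe_sequences (maxm : List (List Int)) (alloc : List (List Int)) (available : List Int) (out : List (List Int)) : Prop := out = find_all_safe_sequences_alt maxm alloc available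
instance (maxm : List (List Int)) (alloc : List (List Int)) (available : List Int) (out : List (List Int)) : Decidable (Spec_find_all_safe_sequences maxm alloc available out) := by unfold Spec_find_all_safe_sequences; infer_instance

-- ===== CLAIM (what is proved, stated in full; the proofs are below) =====
def Claim_equal_find_all_safe_sequences : Prop := ∀ (maxm : List (List Int)) (alloc : List (List Int)) (available : List Int), Dom_find_all_safe_sequences maxm alloc available → Pre_find_all_safe_sequences maxm alloc available → Spec_find_all_safe_sequences maxm alloc available (find_all_safe_sequences maxm alloc available)

-- ===== LEMMAS AND PROOFS =====

-- A's backtrack applied to one stack state with its exact remaining depth n - seq.length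
def pvF (n : Nat) (need alloc : List (List Int)) (a : List (List Int)) (st : List Int × List Bool × List Int) : List (List Int) :=
  pvBacktrack n need alloc (n - st.2.2.length) st.1 st.2.1 st.2.2 a

lemma pvBacktrack_done (n : Nat) (need alloc : List (List Int)) (fuel : Nat) (work : List Int)
    (finish : List Bool) (seq : List Int) (acc : List (List Int)) (h : seq.length = n) :
    pvBacktrack n need alloc fuel work finish seq acc = acc ++ [seq] := by
  rw [pvBacktrack.eq_def]; simp [h]

lemma pvBacktrack_succ (n : Nat) (need alloc : List (List Int)) (fuel : Nat) (work : List Int)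
    (finish : List Bool) (seq : List Int) (acc : List (List Int)) (h : ¬ seq.length = n) :
    pvBacktrack n need alloc (fuel + 1) work finish seq acc =
      (List.range n).foldl
        (fun a i =>
          if pvElig need work finish i then
            pvBacktrack n need alloc fuel (pvAdd work (alloc.getD i []))
              (finish.set i true) (seq ++ [(i : Int)]) a
          else a)
        acc := by
  rw [pvBacktrack.eq_def]; simp [h]

-- expanding one state's children equals one level of A's backtracking
lemma pvStep_eq (n : Nat) (need alloc : List (List Int)) (work : List Int) (finish : List Bool)
    (seq : List Int) (acc : List (List Int)) (h : seq.length < n) :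
    (((List.range n).filter (pvElig need work finish)).map (pvChild alloc work finish seq)).foldl
        (pvF n need alloc) acc
      = pvBacktrack n need alloc (n - seq.length) work finish seq acc := by
  have hfuel : n - seq.length = (n - (seq.length + 1)) + 1 := by omega
  rw [hfuel, pvBacktrack_succ n need alloc _ work finish seq acc (by omega),
    List.foldl_map, List.foldl_filter]
  apply PySem.List.foldl_congr_mem
  intro a i _
  by_cases hp : pvElig need work finish i
  · simp [hp, pvF, pvChild]
  · simp [hp]

-- The key invariant: processing the stack left to right equals running A's backtracking (with
-- its exact per-state fuel n - seq.length) on each state in turn, threading the accumulator.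
lemma pvLoop_eq_backtrack (n : Nat) (need alloc : List (List Int)) :
    ∀ (stack : List (List Int × List Bool × List Int)) (acc : List (List Int)),
      (∀ st ∈ stack, st.2.2.length ≤ n) →
      pvLoop n need alloc stack acc = stack.foldl (pvF n need alloc) acc := by
  intro stack acc h
  induction stack, acc using pvLoop.induct n need alloc with
  | case1 acc => rw [pvLoop, List.foldl_nil]
  | case2 work finish seq rest acc hle ih =>
    have hk : seq.length = n := le_antisymm (h (work, finish, seq) (List.mem_cons_self)) hle
    rw [pvLoop]
    simp only [dif_pos hle, List.foldl_cons]
    rw [ih (fun st hst => h st (List.mem_cons_of_mem _ hst))]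
    congr 1
    rw [pvF, pvBacktrack_done n need alloc _ work finish seq acc hk]
  | case3 work finish seq rest acc hlt ih =>
    have hk : seq.length < n := by omega
    have hch : ∀ st ∈ pvPush n need alloc work finish seq rest, st.2.2.length ≤ n := by
      intro st hst
      rw [pvPush_eq] at hst
      rcases List.mem_append.mp hst with hc | hr
      · rcases List.mem_map.mp hc with ⟨i, _, hi⟩
        subst hi
        simp only [pvChild, List.length_append, List.length_cons, List.length_nil]
        omega
      · exact h _ (List.mem_cons_of_mem _ hr)
    rw [pvLoop]
    simp only [dif_neg hlt]
    rw [ih hch, pvPush_eq, List.foldl_append, List.foldl_cons,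
      pvStep_eq n need alloc work finish seq acc hk]
    rfl

-- ===== VERDICT (by name: the statement is the Claim_ definition above) =====
theorem find_all_safe_sequences_spec : Claim_equal_find_all_safe_sequences := by
  intro maxm alloc available _ _
  unfold Spec_find_all_safe_sequences find_all_safe_sequences find_all_safe_sequences_alt
  rw [pvLoop_eq_backtrack _ _ _ _ _ (by simp)]
  simp [pvF]
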